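-- pv_equiv track=rewrite | github.com/Tomasinjo/orca-energy-ha | custom_components/orca/orca_api.py | _generate_uri
-- ===== SOURCE A (Python) =====
-- def _generate_uri(tags: list[str]) -> list[str]:
--     params = ""
--     count = 0
--     uris = []
--     for tag in tags:
--         count += 1
--         params += f"&t{count}={tag}"
--         if count >= 150:  # max tags per request
--             uris.append(f"/cgi/readTags?client=OrcaTouch1172&n={count}{params}")
--             params = ""
--             count = 0
--     uris.append(f"/cgi/readTags?client=OrcaTouch1172&n={count}{params}")
--     return uris
-- ===== SOURCE B (Python) =====
-- def _generate_uri(tags: list[str]) -> list[str]: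
--     num_chunks = len(tags) // 150 + 1
--     uris = []
--     for c in range(num_chunks):
--         chunk = tags[c * 150:(c + 1) * 150]
--         params = "".join(f"&t{i}={tag}" for i, tag in enumerate(chunk, 1))
--         uris.append(f"/cgi/readTags?client=OrcaTouch1172&n={len(chunk)}{params}")
--     return uris
-- ===== Notes on version B (the rewrite author's own statement) =====
-- stated objective: simpler
-- what changed: Replaces A's single accumulate-and-flush pass with mutable params/count state by an explicit chunk decomposition: len(tags)//150+1 slices, each chunk's params built by enumerating the chunk from 1 and joined, which also reproduces the trailing short/empty URI.
import Mathlib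
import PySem

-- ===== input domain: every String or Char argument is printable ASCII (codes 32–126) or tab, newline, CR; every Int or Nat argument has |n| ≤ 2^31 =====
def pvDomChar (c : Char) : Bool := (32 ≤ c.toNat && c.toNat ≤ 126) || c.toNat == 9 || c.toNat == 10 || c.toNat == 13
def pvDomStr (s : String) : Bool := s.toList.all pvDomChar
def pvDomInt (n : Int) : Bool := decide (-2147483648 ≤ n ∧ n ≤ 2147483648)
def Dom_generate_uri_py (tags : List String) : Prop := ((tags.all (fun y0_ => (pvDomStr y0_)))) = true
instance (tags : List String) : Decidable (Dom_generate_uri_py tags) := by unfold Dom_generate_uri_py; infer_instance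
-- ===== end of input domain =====

-- B replaces A's accumulate-and-flush pass by an explicit chunk (len//150+1 slices) + per-chunk join decomposition; same values on all inputs.

-- ===== PORT A =====
-- f-string "&t{i}={tag}" (shared formatting helper of both ports)
def pvEntry (i : Int) (tag : String) : String :=
  "&t" ++ PySem.Int.toStr i ++ "=" ++ tag

-- f-string "/cgi/readTags?client=OrcaTouch1172&n={count}{params}"
def pvUri (count : Int) (params : String) : String :=
  "/cgi/readTags?client=OrcaTouch1172&n=" ++ PySem.Int.toStr count ++ params

-- A's for-loop over tags with state (params, count); the final append is the terminal [] case
def pvALoop : List String → String → Int → List String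
  | [], params, count => [pvUri count params]
  | tag :: rest, params, count =>
      if count + 1 ≥ 150 then
        pvUri (count + 1) (params ++ pvEntry (count + 1) tag) :: pvALoop rest "" 0
      else
        pvALoop rest (params ++ pvEntry (count + 1) tag) (count + 1)

def generate_uri_py (tags : List String) : List String :=
  pvALoop tags "" 0

-- ===== PORT B =====
-- "".join(f"&t{i}={tag}" for i, tag in enumerate(chunk, 1))
def pvParams : Int → List String → String
  | _, [] => ""
  | i, tag :: rest => pvEntry i tag ++ pvParams (i + 1) rest

-- B's per-chunk f-string with n = len(chunk)
def pvChunkUri (chunk : List String) : String :=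
  "/cgi/readTags?client=OrcaTouch1172&n=" ++ PySem.Int.toStr chunk.length ++ pvParams 1 chunk

-- tags[c*150:(c+1)*150] = (tags.drop (c*150)).take 150 (PySem.List.slice_natCast_add)
def generate_uri_py_alt (tags : List String) : List String :=
  (List.range (tags.length / 150 + 1)).map
    (fun c => pvChunkUri ((tags.drop (c * 150)).take 150))

-- ===== PRECONDITION & SPEC =====
def Spec_generate_uri_py (tags : List String) (out : List String) : Prop := out = generate_uri_py_alt tags
instance (tags : List String) (out : List String) : Decidable (Spec_generate_uri_py tags out) := by unfold Spec_generate_uri_py; infer_instance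

-- ===== CLAIM (what is proved, stated in full; the proofs are below) =====
def Claim_equal_generate_uri_py : Prop := ∀ (tags : List String), Dom_generate_uri_py tags → Spec_generate_uri_py tags (generate_uri_py tags)

-- ===== LEMMAS AND PROOFS =====

-- A's loop from any in-range state, closed form: one more URI if the remaining tags fit, else a flush at 150 and a restart
theorem pvALoop_eq (ts : List String) : ∀ (params : String) (n : Nat), n < 150 →
    pvALoop ts params (n : Int) =
      if ts.length + n < 150 then
        [pvUri ((ts.length + n : Nat) : Int) (params ++ pvParams ((n : Int) + 1) ts)]
      else
        pvUri 150 (params ++ pvParams ((n : Int) + 1) (ts.take (150 - n))) ::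
          pvALoop (ts.drop (150 - n)) "" 0 := by
  induction ts with
  | nil =>
      intro params n hn
      simp [pvALoop, pvParams, String.append_empty, hn]
  | cons t rest ih =>
      intro params n hn
      by_cases h149 : n = 149
      · subst h149
        have hcond : ¬ ((t :: rest).length + 149 < 150) := by
          simp only [List.length_cons]; omega
        rw [if_neg hcond]
        have : ((149 : Nat) : Int) + 1 = 150 := by norm_num
        simp only [pvALoop]
        rw [if_pos (by norm_num)]
        have htake : (150 : Nat) - 149 = 1 := by norm_num
        rw [htake]
        simp [pvParams, String.append_empty]
      · have hn' : n + 1 < 150 := by omega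
        have hne : ¬ ((n : Int) + 1 ≥ 150) := by omega
        simp only [pvALoop, if_neg hne]
        have hcast : (n : Int) + 1 = ((n + 1 : Nat) : Int) := by push_cast; ring
        rw [hcast, ih (params ++ pvEntry ((n + 1 : Nat) : Int) t) (n + 1) hn']
        rcases Nat.lt_or_ge (rest.length + (n + 1)) 150 with hlt | hge
        · rw [if_pos hlt, if_pos (by simp; omega)]
          have : rest.length + (n + 1) = (t :: rest).length + n := by simp; omega
          rw [this]
          have : ((n + 1 : Nat) : Int) + 1 = (n : Int) + 1 + 1 := by push_cast; ring
          rw [this]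
          simp only [pvParams, ← hcast, String.append_assoc]
        · rw [if_neg (by omega), if_neg (by simp; omega)]
          have h150 : 150 - n = (150 - (n + 1)) + 1 := by omega
          rw [h150]
          have htk : (t :: rest).take ((150 - (n + 1)) + 1) = t :: rest.take (150 - (n + 1)) := by
            simp [List.take_succ_cons]
          have hdr : (t :: rest).drop ((150 - (n + 1)) + 1) = rest.drop (150 - (n + 1)) := by
            simp [List.drop_succ_cons]
          rw [htk, hdr]
          have : ((n + 1 : Nat) : Int) + 1 = (n : Int) + 1 + 1 := by push_cast; ring
          rw [this]
          simp only [pvParams, ← hcast, String.append_assoc]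

-- B on fewer than 150 tags: a single chunk, the whole list
theorem alt_small (tags : List String) (h : tags.length < 150) :
    generate_uri_py_alt tags = [pvChunkUri tags] := by
  have h0 : tags.length / 150 = 0 := Nat.div_eq_of_lt h
  simp [generate_uri_py_alt, h0, List.range_succ, List.take_of_length_le (Nat.le_of_lt h)]

-- B on 150 or more tags: first chunk, then B on the rest
theorem alt_step (tags : List String) (h : 150 ≤ tags.length) :
    generate_uri_py_alt tags = pvChunkUri (tags.take 150) :: generate_uri_py_alt (tags.drop 150) := by
  have hlen : (tags.drop 150).length = tags.length - 150 := by simp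
  have hdiv : tags.length / 150 = (tags.length - 150) / 150 + 1 := by
    conv_lhs => rw [show tags.length = (tags.length - 150) + 150 from by omega]
    rw [Nat.add_div_right _ (by norm_num)]
  unfold generate_uri_py_alt
  rw [hlen, hdiv, List.range_succ_eq_map]
  simp only [List.map_cons, List.map_map, Nat.zero_mul, List.drop_zero, Function.comp_def]
  congr 1
  apply List.map_congr_left
  intro c _
  rw [List.drop_drop]
  have hm : 150 + c * 150 = Nat.succ c * 150 := by omega
  rw [hm]

-- A's loop at the initial state (params = "", count = 0)
theorem pvALoop_zero (ts : List String) :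
    pvALoop ts "" 0 =
      if ts.length < 150 then [pvUri (ts.length : Int) (pvParams 1 ts)]
      else pvUri 150 (pvParams 1 (ts.take 150)) :: pvALoop (ts.drop 150) "" 0 := by
  have h := pvALoop_eq ts "" 0 (by omega)
  simpa [String.empty_append] using h

-- the two ports agree on lists shorter than 150
theorem small_case (tags : List String) (h : tags.length < 150) :
    generate_uri_py tags = generate_uri_py_alt tags := by
  rw [alt_small tags h]
  unfold generate_uri_py
  rw [pvALoop_zero tags, if_pos h]
  simp [pvUri, pvChunkUri]

-- the two ports agree on lists of 150 or more tags, given agreement on the rest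
theorem step_case (tags : List String) (h : 150 ≤ tags.length)
    (ih : generate_uri_py (tags.drop 150) = generate_uri_py_alt (tags.drop 150)) :
    generate_uri_py tags = generate_uri_py_alt tags := by
  rw [alt_step tags h]
  unfold generate_uri_py
  rw [pvALoop_zero tags, if_neg (by omega)]
  have htk : (tags.take 150).length = 150 := by
    simp only [List.length_take]; omega
  have hhead : pvUri 150 (pvParams 1 (tags.take 150)) = pvChunkUri (tags.take 150) := by
    simp [pvUri, pvChunkUri, htk]
  unfold generate_uri_py at ih
  rw [hhead, ih]

theorem main_aux : ∀ (n : Nat) (tags : List String), tags.length ≤ n →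
    generate_uri_py tags = generate_uri_py_alt tags := by
  intro n
  induction n with
  | zero => intro tags hlen; exact small_case tags (by omega)
  | succ n ih =>
      intro tags hlen
      rcases Nat.lt_or_ge tags.length 150 with hlt | hge
      · exact small_case tags hlt
      · exact step_case tags hge (ih _ (by simp only [List.length_drop]; omega))

theorem main_eq (tags : List String) : generate_uri_py tags = generate_uri_py_alt tags :=
  main_aux tags.length tags le_rfl

-- ===== VERDICT (by name: the statement is the Claim_ definition above) =====
theorem generate_uri_py_spec : Claim_equal_generate_uri_py := by
  intro tags _
  unfold Spec_generate_uri_py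
  exact main_eq tags
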